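-- pv_equiv track=rewrite | github.com/AlexsandrSolomkin/Python_SEMINAR_DZ | Python_DZ_SEMINAR_3/DZ_18.py | ClosestElementToX
-- ===== SOURCE A (Python) =====
-- def ClosestElementToX(x, listElements):
--
--     clEl = listElements[0]
--     difference = abs(x - clEl)
--
--     for g in range(1, len(listElements)):
--
--         elDifference = abs(x - listElements[g])
--
--         if difference > elDifference:
--
--             clEl = listElements[g]
--             difference = elDifference
--
--     return clEl
-- ===== SOURCE B (Python) =====
-- def ClosestElementToX(x, listElements):
--     return sorted(listElements, key=lambda e: abs(x - e))[0]
-- ===== Notes on version B (the rewrite author's own statement) =====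
-- stated objective: idiomatic
-- what changed: B sorts the list by distance to x with a stable sort and takes the first element, instead of A's index loop tracking a running best element and best difference; stability reproduces A's first-seen tie-break.
import Mathlib
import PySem

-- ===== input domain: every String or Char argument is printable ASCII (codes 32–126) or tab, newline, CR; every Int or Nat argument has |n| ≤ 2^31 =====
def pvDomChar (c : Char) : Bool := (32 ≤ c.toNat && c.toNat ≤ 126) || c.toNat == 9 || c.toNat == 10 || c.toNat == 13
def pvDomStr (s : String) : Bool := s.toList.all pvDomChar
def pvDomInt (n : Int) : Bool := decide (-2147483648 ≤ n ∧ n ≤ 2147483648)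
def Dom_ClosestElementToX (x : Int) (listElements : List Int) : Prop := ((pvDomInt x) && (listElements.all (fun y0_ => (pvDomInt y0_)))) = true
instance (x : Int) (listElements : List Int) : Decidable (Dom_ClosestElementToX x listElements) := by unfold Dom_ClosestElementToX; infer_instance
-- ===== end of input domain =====

-- B sorts the list by distance to x (stable) and takes the first element, instead of A's
-- running-best loop; stability reproduces A's first-seen tie-break. Objective: idiomatic.

-- ===== PORT A =====
def ClosestElementToX (x : Int) (listElements : List Int) : Int :=
  -- clEl = listElements[0]  (IndexError on []; Pre_ excludes the empty list)
  let clEl := (PySem.List.pyGet? listElements 0).getD 0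
  let difference := |x - clEl|
  let st := (PySem.List.pyRange 1 (listElements.length : Int) 1).foldl
    (fun (st : Int × Int) g =>
      let elDifference := |x - PySem.List.pyGetD listElements g 0|
      if st.2 > elDifference then (PySem.List.pyGetD listElements g 0, elDifference) else st)
    (clEl, difference)
  st.1

-- ===== PORT B =====
def ClosestElementToX_alt (x : Int) (listElements : List Int) : Int :=
  -- sorted(listElements, key=lambda e: abs(x - e))[0]  ([0] raises on []; Pre_ excludes)
  ((PySem.List.sorted listElements (fun e => |x - e|)).headD 0)

-- ===== PRECONDITION & SPEC =====
-- A indexes listElements[0] (and B indexes sorted(...)[0]): both raise IndexError on [].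
def Pre_ClosestElementToX (x : Int) (listElements : List Int) : Prop := listElements ≠ []
instance (x : Int) (listElements : List Int) : Decidable (Pre_ClosestElementToX x listElements) := by unfold Pre_ClosestElementToX; infer_instance
def pvWitness_ClosestElementToX : Int × List Int := (3, [10, -2, 5, 4])

def Spec_ClosestElementToX (x : Int) (listElements : List Int) (out : Int) : Prop := out = ClosestElementToX_alt x listElements
instance (x : Int) (listElements : List Int) (out : Int) : Decidable (Spec_ClosestElementToX x listElements out) := by unfold Spec_ClosestElementToX; infer_instance

-- ===== CLAIM (what is proved, stated in full; the proofs are below) =====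
def Claim_equal_ClosestElementToX : Prop := ∀ (x : Int) (listElements : List Int), Dom_ClosestElementToX x listElements → Pre_ClosestElementToX x listElements → Spec_ClosestElementToX x listElements (ClosestElementToX x listElements)

-- ===== LEMMAS AND PROOFS =====

-- the first-seen minimiser of |x - ·|, as a scalar fold: the common reduct of both ports
def pvStep (x b e : Int) : Int := if |x - e| < |x - b| then e else b

lemma pair_fold (x : Int) : ∀ (t : List Int) (b : Int),
    t.foldl (fun (st : Int × Int) e =>
        if st.2 > |x - e| then (e, |x - e|) else st) (b, |x - b|)
      = (t.foldl (pvStep x) b, |x - t.foldl (pvStep x) b|) := by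
  intro t
  induction t with
  | nil => intro b; rfl
  | cons e t ih =>
      intro b
      simp only [List.foldl_cons, pvStep, gt_iff_lt]
      split_ifs with h <;> simpa using ih _

lemma A_eq_fold (x h : Int) (t : List Int) :
    ClosestElementToX x (h :: t) = t.foldl (pvStep x) h := by
  unfold ClosestElementToX
  simp only [PySem.List.pyGet?_zero_cons, Option.getD_some]
  rw [PySem.List.foldl_pyRange_pyGetD' (xs := h :: t) (a := 1) (d := 0)
      (f := fun (st : Int × Int) e => if st.2 > |x - e| then (e, |x - e|) else st)
      (init := (h, |x - h|)) (by norm_num)]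
  simp only [Int.toNat_one, List.drop_succ_cons, List.drop_zero]
  rw [pair_fold]

lemma insertBy_cons_shape (x e y : Int) (ys : List Int) :
    ∃ tl, PySem.List.insertBy (fun a b => decide (|x - a| < |x - b|)) e (y :: ys)
      = pvStep x y e :: tl := by
  unfold PySem.List.insertBy pvStep
  by_cases h : |x - e| < |x - y|
  · exact ⟨y :: ys, by simp [h]⟩
  · exact ⟨PySem.List.insertBy (fun a b => decide (|x - a| < |x - b|)) e ys, by simp [h]⟩

lemma fold_insert_head (x : Int) : ∀ (t : List Int) (y : Int) (ys : List Int),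
    ∃ tl, t.foldl (fun acc e => PySem.List.insertBy (fun a b => decide (|x - a| < |x - b|)) e acc) (y :: ys)
      = t.foldl (pvStep x) y :: tl := by
  intro t
  induction t with
  | nil => intro y ys; exact ⟨ys, rfl⟩
  | cons e t ih =>
      intro y ys
      obtain ⟨tl₁, h₁⟩ := insertBy_cons_shape x e y ys
      simp only [List.foldl_cons, h₁]
      exact ih _ _

lemma B_eq_fold (x h : Int) (t : List Int) :
    ClosestElementToX_alt x (h :: t) = t.foldl (pvStep x) h := by
  unfold ClosestElementToX_alt
  rw [PySem.List.sorted_eq_foldl_insertBy]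
  simp only [List.foldl_cons]
  obtain ⟨tl, hfold⟩ := fold_insert_head x t h []
  rw [show PySem.List.insertBy (fun a b => decide (|x - a| < |x - b|)) h ([] : List Int) = [h] from rfl] at *
  rw [hfold]
  rfl

-- ===== VERDICT (by name: the statement is the Claim_ definition above) =====
theorem ClosestElementToX_spec : Claim_equal_ClosestElementToX := by
  intro x l _ hpre
  cases l with
  | nil => exact absurd rfl hpre
  | cons h t =>
      unfold Spec_ClosestElementToX
      rw [A_eq_fold, B_eq_fold]
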